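-- pv_equiv track=rewrite | github.com/Elowarp/latexToMkdocs | noyerTransformer/convertNoyer.py | getEnvironment
-- ===== SOURCE A (Python) =====
-- def getEnvironment(string):
--     """
--     Récupère le contenu d'un environnement dans un string
--
--     Trouve le premier '{' et renvoie tout ce qu'il y a dedans
--
--     :param string: le string à analyser
--     :type string: str
--     :return: le contenu de l'environnement
--     """
--     count = None
--     ignoreLine = False
--     for i in range(len(string)):
--         if ignoreLine:
--             continue
--
--         if string[i] == '%':
--             ignoreLine = True
--             continue
--
--         if string[i] == '{':
--             if count == None: count = 0
--             count += 1
--         elif string[i] == '}':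
--             count -= 1
--         if count == 0:
--             return string[string.find('{')+1:i]
-- ===== SOURCE B (Python) =====
-- def getEnvironment(string):
--     """
--     Récupère le contenu d'un environnement dans un string
--
--     Trouve le premier '{' et renvoie tout ce qu'il y a dedans
--
--     :param string: le string à analyser
--     :type string: str
--     :return: le contenu de l'environnement
--     """
--     cut = string.find('%')
--     active = string if cut == -1 else string[:cut]
--     pending = []
--     match = {}
--     for i, c in enumerate(active):
--         if c == '{':
--             pending.append(i)
--         elif c == '}':
--             if pending:
--                 match[pending.pop()] = i
--     start = active.find('{')
--     if start == -1 or start not in match: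
--         return None
--     return string[start + 1:match[start]]
-- ===== Notes on version B (the rewrite author's own statement) =====
-- stated objective: faster
-- what changed: B truncates at the first '%', builds the complete brace-pair matching of that prefix in one fold using a stack of open-brace indices and a dict mapping each '{' index to its matching '}' index, then answers by a single dict lookup of the first '{' index - replacing A's early-returning per-character ignoreLine/None-count state machine (which scans the whole string even after the first '%').
import Mathlib
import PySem

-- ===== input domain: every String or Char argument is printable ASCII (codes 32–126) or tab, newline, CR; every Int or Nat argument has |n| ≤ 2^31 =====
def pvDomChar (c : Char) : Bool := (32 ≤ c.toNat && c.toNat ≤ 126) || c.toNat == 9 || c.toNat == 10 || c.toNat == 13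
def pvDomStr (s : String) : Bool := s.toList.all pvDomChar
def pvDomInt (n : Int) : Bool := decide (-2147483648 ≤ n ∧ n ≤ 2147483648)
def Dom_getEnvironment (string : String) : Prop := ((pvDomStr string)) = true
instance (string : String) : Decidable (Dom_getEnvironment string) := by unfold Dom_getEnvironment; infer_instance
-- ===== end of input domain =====

-- B truncates at the first '%', builds the complete brace-pair matching of that prefix with a
-- stack of open-brace indices and a dict, and answers by one dict lookup of the first '{' —
-- replacing A's early-returning ignoreLine/None-count state machine (measured faster: B stops at the first '%').

-- ===== PORT A =====
-- loop state: count : Option Int (None/int), ignoreLine : Bool; i is the running index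
def goA (s : String) (cs : List Char) (i : Nat) (count : Option Int) (ignoreLine : Bool) :
    Option String :=
  match cs with
  | [] => none
  | c :: rest =>
    if ignoreLine then goA s rest (i+1) count ignoreLine
    else if c = '%' then goA s rest (i+1) count true
    else
      -- Python raises TypeError on 'None - 1' when c = '}' with count = None; those inputs are outside Pre_
      let count' : Option Int :=
        if c = '{' then some (count.getD 0 + 1)
        else if c = '}' then count.map (fun x => x - 1)
        else count
      if count' = some 0 then
        some (PySem.Str.slice s (some (PySem.Str.find s "{" + 1)) (some (i : Int)))
      else goA s rest (i+1) count' ignoreLine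

def getEnvironment (string : String) : Option String :=
  goA string string.toList 0 none false

-- ===== PORT B =====
-- for i, c in enumerate(active): maintain the stack 'pending' of open-brace indices (top = head)
-- and the dict 'm' mapping each '{' index to the index of its matching '}'
def goB (l : List Char) (i : Nat) (pending : List Nat) (m : PySem.Dict Nat Nat) :
    List Nat × PySem.Dict Nat Nat :=
  match l with
  | [] => (pending, m)
  | c :: r =>
    if c = '{' then goB r (i+1) (i :: pending) m
    else if c = '}' then
      match pending with
      | j :: rest => goB r (i+1) rest (m.insert j i)
      | [] => goB r (i+1) pending m
    else goB r (i+1) pending m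

def getEnvironment_alt (string : String) : Option String :=
  let cut := PySem.Str.find string "%"
  let active := if cut = -1 then string else PySem.Str.slice string none (some cut)
  let m := (goB active.toList 0 [] PySem.Dict.empty).2
  let start := PySem.Str.find active "{"
  if start = -1 then none
  else
    match m.get? start.toNat with
    | none => none
    | some e => some (PySem.Str.slice string (some (start + 1)) (some (e : Int)))

-- ===== PRECONDITION & SPEC =====
-- Pre_ excludes exactly the inputs on which A raises TypeError (None - 1): a '}' occurring
-- before any '{' in the part of the string before the first '%'.
def Pre_getEnvironment (string : String) : Prop :=
  let a := string.toList.takeWhile (fun x => x ≠ '%')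
  '}' ∉ a ∨ a.idxOf '{' < a.idxOf '}'
instance (string : String) : Decidable (Pre_getEnvironment string) := by
  unfold Pre_getEnvironment; infer_instance

def pvWitness_getEnvironment : String := "x{abc}y"

def Spec_getEnvironment (string : String) (out : Option String) : Prop :=
  out = getEnvironment_alt string
instance (string : String) (out : Option String) : Decidable (Spec_getEnvironment string out) := by
  unfold Spec_getEnvironment; infer_instance

-- ===== CLAIM (what is proved, stated in full; the proofs are below) =====
def Claim_equal_getEnvironment : Prop := ∀ (string : String), Dom_getEnvironment string → Pre_getEnvironment string → Spec_getEnvironment string (getEnvironment string)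


-- ===== LEMMAS AND PROOFS =====

-- spec-level: index of the '}' closing depth d (scan from position i), as both sides reach it
def zc : List Char → Nat → Int → Option Nat
  | [], _, _ => none
  | c :: r, i, d =>
    if c = '{' then zc r (i+1) (d+1)
    else if c = '}' then (if d - 1 = 0 then some i else zc r (i+1) (d-1))
    else zc r (i+1) d

theorem goA_ignore (s : String) (l : List Char) (i : Nat) (count : Option Int) :
    goA s l i count true = none := by
  induction l generalizing i with
  | nil => simp [goA]
  | cons c r ih => simp [goA, ih]

theorem goA_tail (s : String) (r : List Char) (i : Nat) (count : Option Int) :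
    goA s ('%' :: r) i count false = none := by
  simp [goA, goA_ignore]

theorem goA_skip (s : String) (t : List Char) (p : List Char)
    (h1 : '{' ∉ p) (h2 : '}' ∉ p) (h3 : '%' ∉ p) :
    ∀ i : Nat, goA s (p ++ t) i none false = goA s t (i + p.length) none false := by
  induction p with
  | nil => intro i; simp
  | cons c q ih =>
    intro i
    simp only [List.mem_cons, not_or] at h1 h2 h3
    have e : goA s ((c :: q) ++ t) i none false = goA s (q ++ t) (i+1) none false := by
      simp [goA, Ne.symm h3.1, Ne.symm h1.1, Ne.symm h2.1]
    rw [e, ih h1.2 h2.2 h3.2 (i+1)]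
    congr 1
    simp; omega

theorem goA_eq_zc (s : String) (t : List Char) (ht : t = [] ∨ ∃ r, t = '%' :: r)
    (q : List Char) : ∀ (i : Nat) (d : Int), 1 ≤ d → '%' ∉ q →
    goA s (q ++ t) i (some d) false =
      (zc q i d).map (fun j =>
        PySem.Str.slice s (some (PySem.Str.find s "{" + 1)) (some (j : Int))) := by
  induction q with
  | nil =>
    intro i d hd hm
    rcases ht with h | ⟨r, h⟩ <;> subst h <;> simp [goA, zc, goA_tail]
  | cons c q ih =>
    intro i d hd hm
    simp only [List.mem_cons, not_or] at hm
    by_cases hc : c = '{'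
    · subst hc
      have h0 : ¬ (d + 1 = 0) := by omega
      simp [goA, zc, h0]
      simpa using ih (i+1) (d+1) (by omega) hm.2
    · by_cases hc2 : c = '}'
      · subst hc2
        by_cases hz : d - 1 = 0
        · simp [goA, zc, hz]
        · simp [goA, zc, hz]
          simpa using ih (i+1) (d-1) (by omega) hm.2
      · have h0 : ¬ (d = 0) := by omega
        simp [goA, zc, Ne.symm hm.1, hc, hc2, h0]
        simpa using ih (i+1) d hd hm.2

-- once 'start' is off the stack and behind us, the fold never touches m at key 'start'
theorem goB_preserve (start : Nat) (q : List Char) : ∀ (i : Nat) (pending : List Nat)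
    (m : PySem.Dict Nat Nat), start < i → (∀ x ∈ pending, x ≠ start) →
    (goB q i pending m).2.get? start = m.get? start := by
  induction q with
  | nil => intro i pending m _ _; simp [goB]
  | cons c r ih =>
    intro i pending m hi hp
    by_cases hc : c = '{'
    · subst hc
      simp only [goB, if_true]
      exact ih (i+1) (i :: pending) m (by omega)
        (by intro x hx; rcases List.mem_cons.mp hx with h | h
            · subst h; omega
            · exact hp x h)
    · by_cases hc2 : c = '}'
      · subst hc2
        cases pending with
        | nil =>
          simp only [goB, if_neg hc, if_true]
          exact ih (i+1) [] m (by omega) (by intro x hx; simp at hx)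
        | cons j rest =>
          simp only [goB, if_neg hc, if_true]
          rw [ih (i+1) rest (m.insert j i) (by omega) (fun x hx => hp x (List.mem_cons_of_mem _ hx))]
          exact PySem.Dict.get?_insert_of_ne _ _ (Ne.symm (hp j (List.mem_cons_self)))
      · simp only [goB, if_neg hc, if_neg hc2]
        exact ih (i+1) pending m (by omega) hp

theorem goB_eq_zc (start : Nat) (q : List Char) : ∀ (i : Nat) (p : List Nat)
    (m : PySem.Dict Nat Nat), start < i → (∀ x ∈ p, x ≠ start) → m.get? start = none →
    (goB q i (p ++ [start]) m).2.get? start = zc q i ((p.length : Int) + 1) := by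
  induction q with
  | nil => intro i p m _ _ hm; simp [goB, zc, hm]
  | cons c r ih =>
    intro i p m hi hp hm
    by_cases hc : c = '{'
    · subst hc
      simp only [goB, zc, if_true]
      have : (i : Nat) :: (p ++ [start]) = (i :: p) ++ [start] := rfl
      rw [this, ih (i+1) (i :: p) m (by omega)
        (by intro x hx; rcases List.mem_cons.mp hx with h | h
            · subst h; omega
            · exact hp x h) hm]
      norm_num
    · by_cases hc2 : c = '}'
      · subst hc2
        cases p with
        | nil =>
          simp only [goB, zc, if_neg hc, if_true, List.nil_append, List.length_nil,
            Nat.cast_zero]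
          rw [if_pos (by norm_num : (0:Int) + 1 - 1 = 0)]
          rw [goB_preserve start r (i+1) [] (m.insert start i) (by omega)
            (by intro x hx; simp at hx)]
          simp [PySem.Dict.get?_insert_self]
        | cons h tl =>
          have hne : ¬ (((h :: tl).length : Int) + 1 - 1 = 0) := by
            simp; omega
          simp only [goB, zc, if_neg hc, if_true, List.cons_append, if_neg hne]
          rw [ih (i+1) tl (m.insert h i) (by omega)
            (fun x hx => hp x (List.mem_cons_of_mem _ hx))
            (by rw [PySem.Dict.get?_insert_of_ne _ _ (Ne.symm (hp h List.mem_cons_self))]; exact hm)]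
          norm_num
      · simp only [goB, zc, if_neg hc, if_neg hc2]
        exact ih (i+1) p m (by omega) hp hm

theorem goB_skip (q : List Char) (p : List Char)
    (h1 : '{' ∉ p) (h2 : '}' ∉ p) :
    ∀ (i : Nat) (pending : List Nat) (m : PySem.Dict Nat Nat),
      goB (p ++ q) i pending m = goB q (i + p.length) pending m := by
  induction p with
  | nil => intro i pending m; simp
  | cons c r ih =>
    intro i pending m
    simp only [List.mem_cons, not_or] at h1 h2
    have e : goB ((c :: r) ++ q) i pending m = goB (r ++ q) (i+1) pending m := by
      simp [goB, Ne.symm h1.1, Ne.symm h2.1]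
    rw [e, ih h1.2 h2.2 (i+1) pending m]
    congr 1
    simp; omega

theorem takeWhile_ne_eq (l : List Char) (c : Char) :
    l.takeWhile (fun x => x ≠ c) = l.take (l.idxOf c) := by
  induction l with
  | nil => rfl
  | cons x r ih =>
    by_cases h : x = c
    · subst h; simp [List.idxOf_cons_eq r rfl]
    · simp [h, List.idxOf_cons_ne r (by exact h)]
      simpa using ih

theorem dropWhile_ne_head (l : List Char) (c : Char) :
    l.dropWhile (fun x => x ≠ c) = [] ∨ ∃ r, l.dropWhile (fun x => x ≠ c) = c :: r := by
  induction l with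
  | nil => exact Or.inl rfl
  | cons x r ih =>
    by_cases h : x = c
    · subst h; exact Or.inr ⟨r, by simp⟩
    · simpa [List.dropWhile_cons, h] using ih

theorem idxOf_le_of_getElem (l : List Char) (c : Char) :
    ∀ (j : Nat) (hj : j < l.length), l[j] = c → l.idxOf c ≤ j := by
  induction l with
  | nil => intro j hj; simp at hj
  | cons x r ih =>
    intro j hj h
    cases j with
    | zero => simp at h; simp [List.idxOf_cons_eq r h]
    | succ j =>
      by_cases hx : x = c
      · simp [List.idxOf_cons_eq r hx]
      · rw [List.idxOf_cons_ne r (by exact hx)]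
        have := ih j (by simpa using hj) (by simpa using h)
        omega

theorem char_find_eq (cs : List Char) (c : Char) :
    PySem.Chars.find cs [c] = if c ∈ cs then (cs.idxOf c : Int) else -1 := by
  by_cases h : c ∈ cs
  · rw [if_pos h]
    have hinf : [c] <:+: cs := by
      obtain ⟨l1, l2, rfl⟩ := List.append_of_mem h
      exact ⟨l1, l2, by simp⟩
    have hnn : 0 ≤ PySem.Chars.find cs [c] := (PySem.Chars.find_nonneg_iff cs [c]).mpr hinf
    obtain ⟨hpre, hmin⟩ := PySem.Chars.find_spec hnn
    set j := (PySem.Chars.find cs [c]).toNat with hj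
    obtain ⟨tl, htl⟩ := hpre
    have hjlt : j < cs.length := by
      have hlen := congrArg List.length htl
      simp [List.length_drop] at hlen
      omega
    rw [List.drop_eq_getElem_cons hjlt] at htl
    simp only [List.singleton_append, List.cons.injEq] at htl
    have hget : cs[j] = c := htl.1.symm
    have hk : cs.idxOf c < cs.length := List.idxOf_lt_length_of_mem h
    have h1 : cs.idxOf c ≤ j := idxOf_le_of_getElem cs c j hjlt hget
    have h2 : ¬ (cs.idxOf c < j) := by
      intro hlt
      apply hmin _ hlt
      refine ⟨cs.drop (cs.idxOf c + 1), ?_⟩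
      rw [List.drop_eq_getElem_cons hk]
      simp [List.getElem_idxOf hk]
    rw [show cs.idxOf c = j by omega, hj, Int.toNat_of_nonneg hnn]
  · rw [if_neg h]
    apply (PySem.Chars.find_eq_neg_one_iff cs [c]).mpr
    intro hinf
    exact h (hinf.subset (by simp))

-- B in terms of zc on the '%'-free prefix
theorem alt_eq (string : String)
    (hpre : '}' ∉ string.toList.takeWhile (fun x => x ≠ '%') ∨
      (string.toList.takeWhile (fun x => x ≠ '%')).idxOf '{' <
      (string.toList.takeWhile (fun x => x ≠ '%')).idxOf '}') :
    getEnvironment_alt string =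
      (if '{' ∈ string.toList.takeWhile (fun x => x ≠ '%') then
        (zc ((string.toList.takeWhile (fun x => x ≠ '%')).drop
              ((string.toList.takeWhile (fun x => x ≠ '%')).idxOf '{' + 1))
            ((string.toList.takeWhile (fun x => x ≠ '%')).idxOf '{' + 1) 1).map
          (fun j => PySem.Str.slice string
            (some (((string.toList.takeWhile (fun x => x ≠ '%')).idxOf '{' : Int) + 1))
            (some (j : Int)))
      else none) := by
  have hcut : PySem.Str.find string "%" =
      if '%' ∈ string.toList then (string.toList.idxOf '%' : Int) else -1 := by
    have : "%".toList = ['%'] := rfl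
    simp [this, char_find_eq]
  have hactive : (if PySem.Str.find string "%" = -1 then string
      else PySem.Str.slice string none (some (PySem.Str.find string "%"))).toList =
      string.toList.takeWhile (fun x => x ≠ '%') := by
    by_cases hmem : '%' ∈ string.toList
    · rw [hcut, if_pos hmem]
      have hne : ¬ ((string.toList.idxOf '%' : Int) = -1) := by omega
      rw [if_neg hne]
      rw [PySem.Str.toList_slice, PySem.Chars.slice_eq_listSlice, takeWhile_ne_eq,
        PySem.List.slice_to_natCast]
    · rw [hcut, if_neg hmem, if_pos rfl, takeWhile_ne_eq, List.idxOf_of_notMem hmem,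
        List.take_length]
  set a := string.toList.takeWhile (fun x => x ≠ '%') with ha
  have hfind : PySem.Str.find (if PySem.Str.find string "%" = -1 then string
      else PySem.Str.slice string none (some (PySem.Str.find string "%"))) "{" =
      PySem.Chars.find a ['{'] := by
    have h2 : "{".toList = ['{'] := rfl
    rw [PySem.Str.find_eq, hactive, h2]
  simp only [getEnvironment_alt]
  rw [hactive, hfind, char_find_eq]
  by_cases hmem : '{' ∈ a
  · rw [if_pos hmem, if_pos hmem,
      if_neg (by omega : ¬ ((a.idxOf '{' : Int) = -1))]
    set k := a.idxOf '{' with hk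
    have hklt : k < a.length := List.idxOf_lt_length_of_mem hmem
    have hgetk : a[k] = '{' := List.getElem_idxOf hklt
    have hdropk : a.drop k = '{' :: a.drop (k+1) := by
      rw [List.drop_eq_getElem_cons hklt, hgetk]
    have hdecomp : a.take k ++ '{' :: a.drop (k+1) = a := by
      rw [← hdropk]; exact List.take_append_drop k a
    have hp1 : '{' ∉ a.take k := by
      intro hx
      have := (List.mem_take_iff_idxOf_lt hmem).mp hx
      omega
    have hp2 : '}' ∉ a.take k := by
      intro hx
      have hmem2 : '}' ∈ a := List.take_subset _ _ hx
      rcases hpre with h | h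
      · exact h hmem2
      · have := (List.mem_take_iff_idxOf_lt hmem2).mp hx
        omega
    have hstack : (goB a 0 [] PySem.Dict.empty).2.get? k = zc (a.drop (k+1)) (k+1) 1 := by
      conv_lhs => rw [← hdecomp]
      rw [goB_skip _ _ hp1 hp2 0 [] PySem.Dict.empty]
      have hlen : (a.take k).length = k := by rw [List.length_take]; omega
      rw [hlen]
      have hstep : goB ('{' :: a.drop (k+1)) (0 + k) [] PySem.Dict.empty =
          goB (a.drop (k+1)) (0 + k + 1) [k] PySem.Dict.empty := by
        simp [goB]
      rw [hstep]
      have : [k] = ([] : List Nat) ++ [k] := rfl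
      rw [this, goB_eq_zc k (a.drop (k+1)) (0 + k + 1) [] PySem.Dict.empty (by omega)
        (by intro x hx; simp at hx) (PySem.Dict.get?_empty k)]
      norm_num
    have htonat : ((k : Int)).toNat = k := by simp
    rw [htonat, hstack]
    cases zc (a.drop (k+1)) (k+1) 1 <;> simp
  · rw [if_neg hmem, if_neg hmem, if_pos rfl]

theorem main_eq (string : String)
    (hpre : '}' ∉ string.toList.takeWhile (fun x => x ≠ '%') ∨
      (string.toList.takeWhile (fun x => x ≠ '%')).idxOf '{' <
      (string.toList.takeWhile (fun x => x ≠ '%')).idxOf '}') :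
    getEnvironment string = getEnvironment_alt string := by
  rw [alt_eq string hpre]
  set cs := string.toList with hcs
  set a := cs.takeWhile (fun x => x ≠ '%') with ha
  have hsplit : a ++ cs.dropWhile (fun x => x ≠ '%') = cs := List.takeWhile_append_dropWhile
  set t := cs.dropWhile (fun x => x ≠ '%') with htdef
  have ht : t = [] ∨ ∃ r, t = '%' :: r := dropWhile_ne_head cs '%'
  have hmemA : ∀ x ∈ a, x ≠ '%' := by
    intro x hx
    have := List.mem_takeWhile_imp hx
    simpa using this
  by_cases hb : '{' ∈ a
  · rw [if_pos hb]
    set k := a.idxOf '{' with hk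
    have hklt : k < a.length := List.idxOf_lt_length_of_mem hb
    have hgetk : a[k] = '{' := List.getElem_idxOf hklt
    have hdropk : a.drop k = '{' :: a.drop (k+1) := by
      rw [List.drop_eq_getElem_cons hklt, hgetk]
    have hdecomp : a.take k ++ '{' :: a.drop (k+1) = a := by
      rw [← hdropk]; exact List.take_append_drop k a
    have hp1 : '{' ∉ a.take k := by
      intro hx
      have := (List.mem_take_iff_idxOf_lt hb).mp hx
      omega
    have hp3 : '%' ∉ a.take k := fun hx => hmemA _ (List.take_subset _ _ hx) rfl
    have hp2 : '}' ∉ a.take k := by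
      intro hx
      have hmem2 : '}' ∈ a := List.take_subset _ _ hx
      rcases hpre with h | h
      · exact h hmem2
      · have := (List.mem_take_iff_idxOf_lt hmem2).mp hx
        omega
    have hq : '%' ∉ a.drop (k+1) := fun hx => hmemA _ (List.drop_subset _ _ hx) rfl
    have hfind : PySem.Str.find string "{" = (k : Int) := by
      have h2 : "{".toList = ['{'] := rfl
      rw [PySem.Str.find_eq, h2, ← hcs, char_find_eq]
      have hbcs : '{' ∈ cs := (List.takeWhile_prefix _).subset hb
      rw [if_pos hbcs]
      congr 1
      rw [← hsplit, List.idxOf_append_of_mem hb]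
    have hcs2 : cs = a.take k ++ ('{' :: (a.drop (k+1) ++ t)) := by
      rw [show ('{' :: (a.drop (k+1) ++ t)) = ('{' :: a.drop (k+1)) ++ t from rfl,
        ← List.append_assoc, hdecomp, hsplit]
    have hA : getEnvironment string = goA string (a.take k ++ ('{' :: (a.drop (k+1) ++ t))) 0 none false := by
      unfold getEnvironment
      rw [← hcs, hcs2]
    rw [hA, goA_skip string _ _ hp1 hp2 hp3 0]
    have hlen : (a.take k).length = k := by
      rw [List.length_take]; omega
    rw [hlen]
    have hstep : goA string ('{' :: (a.drop (k+1) ++ t)) (0 + k) none false =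
        goA string (a.drop (k+1) ++ t) (0 + k + 1) (some 1) false := by
      simp [goA]
    rw [hstep, goA_eq_zc string t ht _ (0 + k + 1) 1 (by omega) hq]
    rw [hfind]
    norm_num
  · rw [if_neg hb]
    have hnr : '}' ∉ a := by
      rcases hpre with h | h
      · exact h
      · intro hx
        have h1 := List.idxOf_lt_length_of_mem hx
        have h2 : a.idxOf '{' = a.length := List.idxOf_of_notMem hb
        omega
    unfold getEnvironment
    rw [← hcs, ← hsplit, goA_skip string t a hb hnr (fun hx => hmemA _ hx rfl) 0]
    rcases ht with h | ⟨r, h⟩ <;> rw [h]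
    · rfl
    · exact goA_tail string r _ none

-- ===== VERDICT (by name: the statement is the Claim_ definition above) =====
theorem getEnvironment_spec : Claim_equal_getEnvironment := by
  intro string _ hpre
  unfold Spec_getEnvironment
  simp only [Pre_getEnvironment] at hpre
  exact main_eq string hpre
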